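-- pv_equiv track=rewrite | github.com/brunoguedes/readmeWriterAssistant | src/readmewriterassistant/files_manager.py | format_file_tree
-- ===== SOURCE A (Python) =====
-- def format_file_tree(file_list):
--     tree = {}
--     for path in file_list:
--         parts = path.split("/")
--         current = tree
--         for part in parts:
--             if part != "":
--                 if part not in current:
--                     current[part] = {}
--                 current = current[part]
--
--     def print_tree(node, prefix="", is_last=True):
--         tree_structure = ""
--         if isinstance(node, dict):
--             keys = list(node.keys())
--             for i, key in enumerate(keys):
--                 is_last_child = i == len(keys) - 1
--                 tree_structure += prefix + ("└── " if is_last_child else "├── ") + key + "\n"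
--                 tree_structure += print_tree(node[key], prefix + ("    " if is_last_child else "│   "), is_last_child)
--         return tree_structure
--
--     return print_tree(tree).strip()
-- ===== SOURCE B (Python) =====
-- def format_file_tree(file_list):
--     tree = {}
--     for path in file_list:
--         cur = tree
--         for part in path.split("/"):
--             if part != "":
--                 cur = cur.setdefault(part, {})
--     lines = []
--     top = list(tree.items())
--     stack = [(k, v, "", i == len(top) - 1) for i, (k, v) in enumerate(top)][::-1]
--     while stack:
--         key, node, prefix, is_last = stack.pop()
--         lines.append(prefix + ("└── " if is_last else "├── ") + key + "\n")
--         child_prefix = prefix + ("    " if is_last else "│   ")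
--         kids = list(node.items())
--         n = len(kids)
--         for i in range(n - 1, -1, -1):
--             k, v = kids[i]
--             stack.append((k, v, child_prefix, i == n - 1))
--     return "".join(lines).strip()
-- ===== Notes on version B (the rewrite author's own statement) =====
-- stated objective: alternative
-- what changed: The recursive tree renderer is replaced by an explicit stack of (key, node, prefix, is_last) frames, pushed in reverse and popped in pre-order, collecting lines into a list joined at the end.
import Mathlib
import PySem

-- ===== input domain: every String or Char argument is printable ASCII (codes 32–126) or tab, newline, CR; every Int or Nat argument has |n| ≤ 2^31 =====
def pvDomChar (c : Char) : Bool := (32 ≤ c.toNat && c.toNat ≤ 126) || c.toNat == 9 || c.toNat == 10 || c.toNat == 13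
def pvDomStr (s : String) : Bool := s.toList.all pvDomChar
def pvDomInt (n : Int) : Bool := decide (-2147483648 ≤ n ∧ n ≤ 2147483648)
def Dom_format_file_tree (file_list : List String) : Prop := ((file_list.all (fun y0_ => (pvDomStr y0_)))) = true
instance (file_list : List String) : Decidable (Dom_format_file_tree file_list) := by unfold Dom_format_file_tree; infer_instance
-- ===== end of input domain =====

-- B keeps A's tree-building phase but replaces the recursive renderer with an explicit stack loop over frames (objective: alternative decomposition, same cost).

-- ===== PORT A =====
-- The nested Python dict {name: subtree, …} in insertion order, as a flat inductive:
-- `cons k c rest` = entry (k ↦ children c) followed by the remaining sibling entries `rest`.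
inductive Forest where
  | nil : Forest
  | cons : String → Forest → Forest → Forest
deriving DecidableEq, Repr

def Forest.fsize : Forest → Nat
  | .nil => 0
  | .cons _ c r => 1 + c.fsize + r.fsize

-- `for part in parts: if part != "": …; current = current[part]` — the moving `current`
-- pointer becomes mutual recursion: `insGo` walks the parts, `insAt` finds/creates key `p`
-- (created at the end, as Python dict insertion does) and descends into it.
mutual
def insGo : Forest → List String → Forest
  | f, [] => f
  | f, p :: ps => if p = "" then insGo f ps else insAt f p ps
  termination_by _f ps => (ps.length, 0)
def insAt : Forest → String → List String → Forest
  | .nil, p, ps => .cons p (insGo .nil ps) .nil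
  | .cons k c r, p, ps => if k = p then .cons k (insGo c ps) r else .cons k c (insAt r p ps)
  termination_by f _p ps => (ps.length, sizeOf f)
end

-- `for path in file_list:` building `tree`; `path.split("/")` via PySem.Str.split?
-- (exact: the separator "/" is non-empty, so split? is always `some`)
def buildTree (file_list : List String) : Forest :=
  file_list.foldl (fun t path => insGo t ((PySem.Str.split? path "/").getD [])) .nil

-- print_tree: for each key, emit its line, then recurse into its children with the
-- extended prefix, then continue with the remaining siblings; is_last_child = (rest = nil).
def renderA : Forest → String → String
  | .nil, _ => ""
  | .cons k c rest, pfx =>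
    pfx ++ (if rest = Forest.nil then "└── " else "├── ") ++ k ++ "\n"
      ++ renderA c (pfx ++ (if rest = Forest.nil then "    " else "│   "))
      ++ renderA rest pfx

def format_file_tree (file_list : List String) : String :=
  PySem.Str.strip (renderA (buildTree file_list) "")

-- ===== PORT B =====
-- a frame = (key, child forest, prefix, is_last); `framesOf f pfx` lists f's entries as
-- frames in order (B pushes them reversed so they pop left to right, i.e. in this order).
def framesOf : Forest → String → List (String × Forest × String × Bool)
  | .nil, _ => []
  | .cons k c rest, pfx => (k, c, pfx, (rest = Forest.nil : Bool)) :: framesOf rest pfx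

-- termination measure for the stack loop (proof-only bookkeeping, stated before loopB so it can cite it)
def stackSize : List (String × Forest × String × Bool) → Nat
  | [] => 0
  | fr :: fs => fr.2.1.fsize + 1 + stackSize fs

theorem stackSize_append (a b : List (String × Forest × String × Bool)) :
    stackSize (a ++ b) = stackSize a + stackSize b := by
  induction a with
  | nil => simp [stackSize]
  | cons fr fs ih => simp [stackSize, ih]; omega

theorem stackSize_framesOf (f : Forest) (pfx : String) :
    stackSize (framesOf f pfx) = f.fsize := by
  induction f generalizing pfx with
  | nil => rfl
  | cons k c r ihc ihr => simp [framesOf, stackSize, Forest.fsize, ihr]; omega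

-- the `while stack:` loop: pop a frame, append its line, push its children's frames
def loopB : List (String × Forest × String × Bool) → List String → List String
  | [], lines => lines
  | (k, c, pfx, last) :: rest, lines =>
    loopB (framesOf c (pfx ++ (if last then "    " else "│   ")) ++ rest)
      (lines ++ [pfx ++ (if last then "└── " else "├── ") ++ k ++ "\n"])
termination_by fs _ => stackSize fs
decreasing_by
  simp [stackSize, stackSize_append, stackSize_framesOf]

-- hand port of `"".join(lines)`: concatenation (exact, the separator is empty)
def joinEmpty : List String → String
  | [] => ""
  | s :: t => s ++ joinEmpty t

def format_file_tree_alt (file_list : List String) : String :=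
  PySem.Str.strip (joinEmpty (loopB (framesOf (buildTree file_list) "") []))

-- ===== PRECONDITION & SPEC =====
def Spec_format_file_tree (file_list : List String) (out : String) : Prop := out = format_file_tree_alt file_list
instance (file_list : List String) (out : String) : Decidable (Spec_format_file_tree file_list out) := by unfold Spec_format_file_tree; infer_instance

-- ===== CLAIM (what is proved, stated in full; the proofs are below) =====
def Claim_equal_format_file_tree : Prop := ∀ (file_list : List String), Dom_format_file_tree file_list → Spec_format_file_tree file_list (format_file_tree file_list)

-- ===== LEMMAS AND PROOFS =====

-- what one frame contributes to the output: its line, then its subtree rendered A-style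
def renderFrame : String × Forest × String × Bool → String
  | (k, c, pfx, last) =>
    pfx ++ (if last then "└── " else "├── ") ++ k ++ "\n"
      ++ renderA c (pfx ++ (if last then "    " else "│   "))

def renderFrames : List (String × Forest × String × Bool) → String
  | [] => ""
  | fr :: fs => renderFrame fr ++ renderFrames fs

theorem renderFrames_append (a b : List (String × Forest × String × Bool)) :
    renderFrames (a ++ b) = renderFrames a ++ renderFrames b := by
  induction a with
  | nil => simp [renderFrames]
  | cons fr fs ih => simp [renderFrames, ih, String.append_assoc]

theorem renderFrames_framesOf (f : Forest) (pfx : String) :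
    renderFrames (framesOf f pfx) = renderA f pfx := by
  induction f generalizing pfx with
  | nil => rfl
  | cons k c r ihc ihr =>
    simp [framesOf, renderFrames, renderFrame, renderA, ihr, String.append_assoc]

theorem joinEmpty_append (a b : List String) :
    joinEmpty (a ++ b) = joinEmpty a ++ joinEmpty b := by
  induction a with
  | nil => simp [joinEmpty]
  | cons s t ih => simp [joinEmpty, ih, String.append_assoc]

theorem loopB_spec (fs : List (String × Forest × String × Bool)) (lines : List String) :
    joinEmpty (loopB fs lines) = joinEmpty lines ++ renderFrames fs := by
  match fs with
  | [] => simp [loopB, renderFrames]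
  | (k, c, pfx, last) :: rest =>
    rw [loopB, loopB_spec]
    simp [joinEmpty_append, renderFrames_append, renderFrames_framesOf,
      renderFrames, renderFrame, joinEmpty, String.append_assoc]
termination_by stackSize fs
decreasing_by
  simp [stackSize, stackSize_append, stackSize_framesOf]

-- ===== VERDICT (by name: the statement is the Claim_ definition above) =====
theorem format_file_tree_spec : Claim_equal_format_file_tree := by
  intro fl _
  unfold Spec_format_file_tree format_file_tree format_file_tree_alt
  rw [loopB_spec, renderFrames_framesOf]
  simp [joinEmpty]
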